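-- pv_equiv track=rewrite | github.com/abhishekkb/kakkerla | google-foobar/AccessCodes/accessCodes3.py | answer
-- ===== SOURCE A (Python) =====
-- def answer(x):
--     out = [list(y.lower()) for y in x]
--     notDupes=[]
--
--     while len(out) != 0:
--         item = out.pop()
--         notDupes.append(item)
--         if item in out:
--             out = list(filter(item.__ne__, out))
--
--         itemrev=list(reversed(item))
--         if itemrev in out:
--             out = list(filter(itemrev.__ne__, out))
--
--         #if item in out:
--         #    out = (x for x in out if ((x not in out) or (list(reversed(x)) not in out)))
--
--     return len(notDupes)
-- ===== SOURCE B (Python) =====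
-- def answer(x):
--     keys = sorted(min(t, t[::-1]) for t in (y.lower() for y in x))
--     count = 0
--     prev = None
--     for k in keys:
--         if prev is None or k != prev:
--             count += 1
--         prev = k
--     return count
-- ===== Notes on version B (the rewrite author's own statement) =====
-- stated objective: faster
-- what changed: Replaces A's destructive pop-and-refilter loop (repeated membership scans and filter passes over the shrinking list) with a canonical key min(lower(s), reversed lower(s)) per string, one sort, and a single adjacent-comparison pass counting distinct runs.
import Mathlib
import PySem

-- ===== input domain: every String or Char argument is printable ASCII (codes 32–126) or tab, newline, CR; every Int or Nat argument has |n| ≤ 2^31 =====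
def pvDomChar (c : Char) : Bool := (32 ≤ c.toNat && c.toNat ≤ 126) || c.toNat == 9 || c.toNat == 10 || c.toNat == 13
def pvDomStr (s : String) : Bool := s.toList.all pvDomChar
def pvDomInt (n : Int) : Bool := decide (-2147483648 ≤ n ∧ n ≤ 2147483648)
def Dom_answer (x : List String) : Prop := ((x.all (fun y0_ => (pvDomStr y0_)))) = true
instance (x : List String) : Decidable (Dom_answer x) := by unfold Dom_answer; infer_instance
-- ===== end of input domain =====

-- B replaces A's destructive pop-and-refilter scanning loop by canonical keys + one sort + a single
-- adjacent-comparison counting pass (objective: faster, measured).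

-- ===== PORT A =====
-- 'if item in out: out = list(filter(item.__ne__, out))' as a named helper (also carries the loop's termination bound)
def condFilter (l : List (List Char)) (it : List Char) : List (List Char) :=
  if it ∈ l then l.filter (fun z => z ≠ it) else l

theorem condFilter_length_le (l : List (List Char)) (it : List Char) :
    (condFilter l it).length ≤ l.length := by
  unfold condFilter
  split_ifs
  · exact List.length_filter_le _ _
  · exact le_refl _

def answerLoopA (out : List (List Char)) (notDupes : List (List Char)) : List (List Char) :=
  if h : out = [] then notDupes
  else
    let item := out.getLast h
    let notDupes' := notDupes ++ [item]
    let out1 := out.dropLast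
    let out2 := condFilter out1 item
    let itemrev := item.reverse
    let out3 := condFilter out2 itemrev
    answerLoopA out3 notDupes'
termination_by out.length
decreasing_by
  have h2 := condFilter_length_le (condFilter out.dropLast (out.getLast h)) (out.getLast h).reverse
  have h3 := condFilter_length_le out.dropLast (out.getLast h)
  have h1 : (out.dropLast).length = out.length - 1 := by simp
  have h0 : 0 < out.length := List.length_pos_iff.mpr h
  omega

def answer (x : List String) : Int :=
  let out := x.map (fun y => (PySem.Str.lower y).toList)
  ((answerLoopA out []).length : Int)

-- ===== PORT B =====
def answer_alt (x : List String) : Int :=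
  -- instance pinned so that sorted compares key lists with the lexicographic LinearOrder order
  let keys := @PySem.List.sorted (List Char) (List Char) (@Preorder.toLT (List Char) inferInstance) LinearOrder.toDecidableLT
      (x.map (fun y => min (PySem.Str.lower y).toList (PySem.Str.lower y).toList.reverse))
      (fun k => k) false
  let r := keys.foldl
      (fun (st : Int × Option (List Char)) k =>
        (if st.2 = none ∨ st.2 ≠ some k then st.1 + 1 else st.1, some k))
      (0, none)
  r.1

-- ===== PRECONDITION & SPEC =====
def Spec_answer (x : List String) (out : Int) : Prop := out = answer_alt x
instance (x : List String) (out : Int) : Decidable (Spec_answer x out) := by unfold Spec_answer; infer_instance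

-- ===== CLAIM (what is proved, stated in full; the proofs are below) =====
def Claim_equal_answer : Prop := ∀ (x : List String), Dom_answer x → Spec_answer x (answer x)

-- ===== LEMMAS AND PROOFS =====
def canon (l : List Char) : List Char := min l l.reverse

theorem canon_eq_iff (a b : List Char) : canon a = canon b ↔ a = b ∨ a = b.reverse := by
  constructor
  · intro h
    unfold canon at h
    rcases min_choice a a.reverse with h1 | h1 <;> rcases min_choice b b.reverse with h2 | h2 <;>
      rw [h1, h2] at h
    · exact Or.inl h
    · exact Or.inr h
    · right
      rw [← h, List.reverse_reverse]
    · left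
      have := congrArg List.reverse h
      simpa using this
  · intro h
    rcases h with rfl | rfl
    · rfl
    · unfold canon
      rw [List.reverse_reverse, min_comm]

theorem pvCardInsertErase {α : Type} [DecidableEq α] (c : α) (S : Finset α) :
    (insert c S).card = (S.erase c).card + 1 := by
  have h : insert c S = insert c (S.erase c) := by
    ext x; simp [Finset.mem_insert, Finset.mem_erase]; tauto
  rw [h, Finset.card_insert_of_notMem (Finset.notMem_erase _ _)]

theorem loopA_card (n : Nat) : ∀ (out notDupes : List (List Char)), out.length ≤ n →
    (answerLoopA out notDupes).length = notDupes.length + (out.map canon).toFinset.card := by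
  induction n with
  | zero =>
    intro out nd h
    have : out = [] := List.eq_nil_of_length_eq_zero (Nat.le_zero.mp h)
    subst this
    unfold answerLoopA; simp
  | succ n ih =>
    intro out nd h
    unfold answerLoopA
    by_cases hne : out = []
    · subst hne; simp
    · simp only [hne, dite_false]
      set item := out.getLast hne with hitem
      set out1 := out.dropLast with hout1
      -- condFilter is an unconditional filter
      have e2 : ∀ (l : List (List Char)) (it : List Char), condFilter l it = l.filter (fun z => z ≠ it) := by
        intro l it
        unfold condFilter
        split_ifs with hm
        · rfl
        · exact (List.filter_eq_self.mpr (fun z hz => by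
            simp only [decide_eq_true_eq]; intro hzeq; exact hm (hzeq ▸ hz))).symm
      rw [e2, e2]
      -- combined filter keeps exactly the elements of a different canon class
      have ecomb : (out1.filter (fun z => z ≠ item)).filter (fun z => z ≠ item.reverse)
          = out1.filter (fun z => canon z ≠ canon item) := by
        rw [List.filter_filter]
        apply List.filter_congr
        intro z _
        by_cases hc : canon z = canon item
        · rcases (canon_eq_iff z item).mp hc with rfl | rfl <;> simp [hc]
        · have h1 : z ≠ item := fun he => hc (he ▸ rfl)
          have h2 : z ≠ item.reverse := fun he => hc ((canon_eq_iff z item).mpr (Or.inr he))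
          simp [h1, h2, hc]
      rw [ecomb]
      -- recursion
      have hlen : (out1.filter (fun z => canon z ≠ canon item)).length ≤ n := by
        have := List.length_filter_le (fun z => decide (canon z ≠ canon item)) out1
        have h1 : out1.length = out.length - 1 := by simp [hout1]
        have h0 : 0 < out.length := List.length_pos_iff.mpr hne
        omega
      rw [ih _ _ hlen]
      -- finset bookkeeping
      have hsplit : out = out1 ++ [item] := (List.dropLast_append_getLast hne).symm
      have hmapF : ((out1.filter (fun z => canon z ≠ canon item)).map canon).toFinset
          = (out1.map canon).toFinset.erase (canon item) := by
        ext a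
        simp only [List.mem_toFinset, List.mem_map, List.mem_filter, Finset.mem_erase,
          decide_eq_true_eq]
        constructor
        · rintro ⟨z, ⟨hz, hzc⟩, rfl⟩
          exact ⟨hzc, z, hz, rfl⟩
        · rintro ⟨ha, z, hz, rfl⟩
          exact ⟨z, ⟨hz, ha⟩, rfl⟩
      have hmapA : (out.map canon).toFinset = insert (canon item) (out1.map canon).toFinset := by
        rw [hsplit]
        ext a
        simp only [List.map_append, List.map_cons, List.map_nil, List.toFinset_append,
          Finset.mem_union, Finset.mem_insert, List.mem_toFinset, List.mem_cons,
          List.not_mem_nil, or_false]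
        tauto
      rw [hmapF, hmapA, pvCardInsertErase]
      simp; omega

-- B-side: the fold computes the adjacent-difference count
def gAdj : List Char → List (List Char) → Int
  | _, [] => 0
  | p, b :: t => (if b ≠ p then 1 else 0) + gAdj b t

def fAdj : List (List Char) → Int
  | [] => 0
  | a :: t => 1 + gAdj a t

theorem foldl_gAdj (l : List (List Char)) : ∀ (c : Int) (p : List Char),
    (l.foldl (fun (st : Int × Option (List Char)) k =>
      (if st.2 = none ∨ st.2 ≠ some k then st.1 + 1 else st.1, some k)) (c, some p)).1
    = c + gAdj p l := by
  induction l with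
  | nil => intro c p; simp [gAdj]
  | cons b t ih =>
    intro c p
    simp only [List.foldl_cons]
    by_cases hb : b = p
    · subst hb
      simp [gAdj, ih]
    · have hb' : p ≠ b := fun he => hb he.symm
      simp [gAdj, hb, hb', ih]
      omega

theorem foldl_fAdj (l : List (List Char)) :
    (l.foldl (fun (st : Int × Option (List Char)) k =>
      (if st.2 = none ∨ st.2 ≠ some k then st.1 + 1 else st.1, some k)) (0, none)).1
    = fAdj l := by
  cases l with
  | nil => simp [fAdj]
  | cons a t =>
    show (List.foldl _ ((1 : Int), some a) t).1 = fAdj (a :: t)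
    simp only [fAdj]
    exact foldl_gAdj t 1 a

theorem gAdj_sorted : ∀ (l : List (List Char)) (p : List Char), l.Pairwise (· ≤ ·) →
    (∀ x ∈ l, p ≤ x) → gAdj p l = ((l.toFinset.erase p).card : Int) := by
  intro l
  induction l with
  | nil => intro p _ _; simp [gAdj]
  | cons b t ih =>
    intro p hpw hall
    have hpb : p ≤ b := hall b (List.mem_cons_self)
    have htpw : t.Pairwise (· ≤ ·) := hpw.of_cons
    have hbt : ∀ x ∈ t, b ≤ x := fun x hx => (List.pairwise_cons.mp hpw).1 x hx
    by_cases hb : b = p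
    · subst hb
      simp only [gAdj]
      rw [ih b htpw hbt, List.toFinset_cons, Finset.erase_insert_eq_erase]
      simp
    · have hpt : p ∉ t := by
        intro hpmem
        exact hb (le_antisymm (hbt p hpmem) (hall b (List.mem_cons_self)))
      have hpnot : p ∉ (b :: t).toFinset := by
        simp only [List.toFinset_cons, Finset.mem_insert, List.mem_toFinset]
        rintro (h | h)
        · exact hb h.symm
        · exact hpt h
      rw [Finset.erase_eq_of_notMem hpnot]
      simp only [gAdj, ne_eq, hb, not_false_iff, if_pos]
      rw [ih b htpw hbt]
      rw [List.toFinset_cons, pvCardInsertErase]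
      push_cast; ring

theorem fAdj_sorted (l : List (List Char)) (h : l.Pairwise (· ≤ ·)) :
    fAdj l = (l.toFinset.card : Int) := by
  cases l with
  | nil => simp [fAdj]
  | cons a t =>
    have hat : ∀ x ∈ t, a ≤ x := fun x hx => (List.pairwise_cons.mp h).1 x hx
    simp only [fAdj]
    rw [gAdj_sorted t a h.of_cons hat, List.toFinset_cons, pvCardInsertErase]
    push_cast; ring

-- ===== VERDICT (by name: the statement is the Claim_ definition above) =====
theorem answer_spec : Claim_equal_answer := by
  intro x _
  unfold Spec_answer answer answer_alt
  simp only []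
  rw [show (x.map (fun y => min (PySem.Str.lower y).toList (PySem.Str.lower y).toList.reverse))
      = (x.map (fun y => (PySem.Str.lower y).toList)).map canon from by
    rw [List.map_map]; rfl]
  set L := (x.map (fun y => (PySem.Str.lower y).toList)).map canon with hL
  set K := @PySem.List.sorted (List Char) (List Char) (@Preorder.toLT (List Char) inferInstance)
      LinearOrder.toDecidableLT L (fun k => k) false with hK
  have hpw : K.Pairwise (· ≤ ·) := by
    have := PySem.List.sorted_pairwise L (fun k => k)
    exact this
  have hperm : K.Perm L := by
    rw [hK]
    exact @PySem.List.sorted_perm (List Char) (List Char) (@Preorder.toLT (List Char) inferInstance)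
      LinearOrder.toDecidableLT L (fun k => k) false
  rw [foldl_fAdj, fAdj_sorted K hpw, List.toFinset_eq_of_perm K L hperm,
    loopA_card ((x.map (fun y => (PySem.Str.lower y).toList)).length) _ [] (le_refl _)]
  simp [hL]
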